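-- pv_equiv track=rewrite | github.com/sonianand07/Better-French | scripts/check_name_tokens.py | merge_names
-- ===== SOURCE A (Python) =====
-- from typing import List
--
-- def merge_names(text: str) -> List[str]:
--     tok = text.split()
--     out: List[str] = []
--     i = 0
--     def cap(tok: str) -> bool:
--         t = tok.rstrip('.,:;!?')
--         return t and t[0].isupper() and all(c.isalpha() or c in "-.'’" for c in t)
--
--     while i < len(tok):
--         run: List[str] = []
--         while i < len(tok) and cap(tok[i]):
--             run.append(tok[i].rstrip('.,:;!?'))
--             i += 1
--             if len(run) == 5:
--                 break
--         if len(run) >= 2: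
--             out.append(" ".join(run))
--         elif run:
--             out.extend(run)
--         else:
--             i += 1
--     return out
-- ===== SOURCE B (Python) =====
-- from typing import List
--
-- def merge_names(text: str) -> List[str]:
--     def cap(s: str) -> bool:
--         return bool(s) and s[0].isupper() and all(c.isalpha() or c in "-.'’" for c in s)
--
--     out: List[str] = []
--
--     def flush(block: List[str]) -> None:
--         # emit a finished block of capitalized tokens in chunks of at most 5
--         while block:
--             chunk, block = block[:5], block[5:]
--             out.append(" ".join(chunk) if len(chunk) > 1 else chunk[0])
--
--     block: List[str] = []
--     for t in text.split():
--         s = t.rstrip('.,:;!?')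
--         if cap(s):
--             block.append(s)
--         else:
--             flush(block)
--             block = []
--     flush(block)
--     return out
-- ===== Notes on version B (the rewrite author's own statement) =====
-- stated objective: alternative
-- what changed: Replaces A's stateful index loop (inner while with a greedy 5-token break inside an outer while) by a group-then-chunk pass: strip each token, accumulate maximal runs of capitalized tokens into a block, and flush each finished block in chunks of at most 5.
import Mathlib
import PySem

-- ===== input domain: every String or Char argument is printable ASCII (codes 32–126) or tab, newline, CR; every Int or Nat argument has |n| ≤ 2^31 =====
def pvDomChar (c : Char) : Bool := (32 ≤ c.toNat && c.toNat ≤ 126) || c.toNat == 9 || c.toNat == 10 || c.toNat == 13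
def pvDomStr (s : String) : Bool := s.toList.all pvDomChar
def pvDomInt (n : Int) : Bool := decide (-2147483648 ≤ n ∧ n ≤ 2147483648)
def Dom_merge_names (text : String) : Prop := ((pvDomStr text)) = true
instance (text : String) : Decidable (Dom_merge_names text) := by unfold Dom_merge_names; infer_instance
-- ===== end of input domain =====

-- B groups maximal runs of capitalized tokens and flushes each block in chunks of at
-- most 5, instead of A's index loop with an in-loop 5-token break; alternative decomposition.

-- ===== PORT A =====
-- tok.rstrip('.,:;!?') ported by hand (exact: drops trailing chars of that set)
def rstripPunctA (t : String) : String :=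
  String.ofList ((t.toList.reverse.dropWhile (fun c => c ∈ ['.', ',', ':', ';', '!', '?'])).reverse)

-- cap(tok): t = tok.rstrip('.,:;!?'); return t and t[0].isupper() and all(c.isalpha() or c in "-.'’" for c in t)
def capA (tok : String) : Bool :=
  match (rstripPunctA tok).toList with
  | [] => false
  | c :: cs => PySem.Chars.isupper c && (c :: cs).all (fun ch => PySem.Chars.isalpha ch || ch ∈ ['-', '.', '\'', '’'])

-- the inner 'while i < len(tok) and cap(tok[i])' loop; i only moves forward through tok,
-- so the remaining suffix tok[i:] is the recursion state; returns (run, remaining suffix)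
def innerA (rem : List String) (run : List String) : List String × List String :=
  match rem with
  | [] => (run, [])
  | t :: ts =>
    if capA t then
      let run' := run ++ [rstripPunctA t]
      if run'.length = 5 then (run', ts) else innerA ts run'
    else (run, t :: ts)

theorem innerA_snd_le (rem run : List String) : (innerA rem run).2.length ≤ rem.length := by
  induction rem generalizing run with
  | nil => simp [innerA]
  | cons t ts ih =>
    simp only [innerA]
    split
    · split
      · simp
      · exact le_trans (ih _) (by simp)
    · simp

theorem innerA_progress (t : String) (ts : List String) :
    (innerA (t :: ts) []).1 ≠ [] → (innerA (t :: ts) []).2.length < ts.length + 1 := by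
  simp only [innerA]
  split
  · split
    · intro _; simp
    · intro _; exact Nat.lt_succ_of_le (innerA_snd_le ts _)
  · intro h; simp at h

-- the outer 'while i < len(tok)' loop, same suffix state
def outerA (rem : List String) (out : List String) : List String :=
  match rem with
  | [] => out
  | t :: ts =>
    if (innerA (t :: ts) []).1.length ≥ 2 then
      outerA (innerA (t :: ts) []).2 (out ++ [PySem.Str.join " " (innerA (t :: ts) []).1])
    else if (innerA (t :: ts) []).1 ≠ [] then
      outerA (innerA (t :: ts) []).2 (out ++ (innerA (t :: ts) []).1)
    else outerA ts out
termination_by rem.length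
decreasing_by
  · have h2 : 2 ≤ (innerA (t :: ts) []).1.length := by assumption
    have := innerA_progress t ts (by intro h0; rw [h0] at h2; simp at h2)
    simpa using this
  · have := innerA_progress t ts (by assumption)
    simpa using this
  · simp

def merge_names (text : String) : List String :=
  outerA (PySem.Str.split₀ text) []

-- ===== PORT B =====
def rstripPunctB (t : String) : String :=
  String.ofList ((t.toList.reverse.dropWhile (fun c => c ∈ ['.', ',', ':', ';', '!', '?'])).reverse)

-- cap(s): bool(s) and s[0].isupper() and all(c.isalpha() or c in "-.'’" for c in s)
def capB (s : String) : Bool :=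
  match s.toList with
  | [] => false
  | c :: cs => PySem.Chars.isupper c && (c :: cs).all (fun ch => PySem.Chars.isalpha ch || ch ∈ ['-', '.', '\'', '’'])

-- flush(block): while block: chunk, block = block[:5], block[5:]; out.append(" ".join(chunk) if len(chunk) > 1 else chunk[0])
def flushB (out : List String) (block : List String) : List String :=
  match hb : block with
  | [] => out
  | _ :: _ =>
    let chunk := PySem.List.slice block none (some 5)
    let rest := PySem.List.slice block (some 5) none
    flushB (out ++ [if chunk.length > 1 then PySem.Str.join " " chunk else chunk.headI]) rest
termination_by block.length
decreasing_by
  subst hb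
  rw [PySem.List.slice_from _ (by norm_num)]
  simp

def stepB (st : List String × List String) (t : String) : List String × List String :=
  let s := rstripPunctB t
  if capB s then (st.1, st.2 ++ [s]) else (flushB st.1 st.2, [])

def merge_names_alt (text : String) : List String :=
  let st := (PySem.Str.split₀ text).foldl stepB ([], [])
  flushB st.1 st.2

-- ===== PRECONDITION & SPEC =====
def Spec_merge_names (text : String) (out : List String) : Prop := out = merge_names_alt text
instance (text : String) (out : List String) : Decidable (Spec_merge_names text out) := by unfold Spec_merge_names; infer_instance

-- ===== CLAIM (what is proved, stated in full; the proofs are below) =====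
def Claim_equal_merge_names : Prop := ∀ (text : String), Dom_merge_names text → Spec_merge_names text (merge_names text)

-- ===== LEMMAS AND PROOFS =====

theorem capA_eq_capB (t : String) : capA t = capB (rstripPunctB t) := by
  simp [capA, capB, rstripPunctA, rstripPunctB]

theorem flushB_nil (out : List String) : flushB out [] = out := by simp [flushB]

theorem flushB_cons (out : List String) (b : String) (bs : List String) :
    flushB out (b :: bs) =
      flushB (out ++ [if ((b :: bs).take 5).length > 1 then PySem.Str.join " " ((b :: bs).take 5)
                      else ((b :: bs).take 5).headI]) ((b :: bs).drop 5) := by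
  conv_lhs => rw [flushB]
  rw [PySem.List.slice_to _ (by norm_num : (0:Int) ≤ 5), PySem.List.slice_from _ (by norm_num : (0:Int) ≤ 5)]
  simp

theorem flushB_out (out block : List String) : flushB out block = out ++ flushB [] block := by
  induction hn : block.length using Nat.strong_induction_on generalizing out block with
  | _ n ih =>
    cases block with
    | nil => simp [flushB_nil]
    | cons b bs =>
      rw [flushB_cons, flushB_cons []]
      rw [ih ((b :: bs).drop 5).length (by subst hn; simp) _ _ rfl,
          ih ((b :: bs).drop 5).length (by subst hn; simp)
            ([] ++ [if ((b :: bs).take 5).length > 1 then PySem.Str.join " " ((b :: bs).take 5)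
                    else ((b :: bs).take 5).headI]) _ rfl]
      simp

theorem flushB_five (b c : List String) (hb : b.length = 5) :
    flushB [] (b ++ c) = PySem.Str.join " " b :: flushB [] c := by
  cases b with
  | nil => simp at hb
  | cons x xs =>
    have h1 : ((x :: xs) ++ c).take 5 = x :: xs := by
      rw [List.take_append_of_le_length (by omega)]; simpa using List.take_of_length_le (le_of_eq hb)
    have h2 : ((x :: xs) ++ c).drop 5 = c := by
      rw [List.drop_append_of_le_length (by omega)]; simp [List.drop_of_length_le (le_of_eq hb)]
    rw [List.cons_append, flushB_cons]
    rw [List.cons_append] at h1 h2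
    rw [h1, h2, if_pos (by rw [hb]; norm_num)]
    rw [flushB_out]
    simp

theorem flushB_small (b : List String) (h1 : b ≠ []) (h2 : b.length ≤ 5) :
    flushB [] b = if 2 ≤ b.length then [PySem.Str.join " " b] else b := by
  cases b with
  | nil => simp at h1
  | cons x xs =>
    rw [flushB_cons]
    rw [List.take_of_length_le h2, List.drop_of_length_le h2, flushB_nil]
    by_cases h : 2 ≤ (x :: xs).length
    · simp only [if_pos h, if_pos (by omega : (x :: xs).length > 1)]; simp
    · have : xs = [] := by cases xs <;> simp_all
      subst this
      simp

-- the common reference shape: accumulate a cap block, flush at separators and at the end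
def emitP : List String → List String → List String
  | block, [] => flushB [] block
  | block, t :: ts =>
    if capA t then emitP (block ++ [rstripPunctA t]) ts
    else flushB [] block ++ emitP [] ts

theorem emitP_five (rem : List String) (b c : List String) (hb : b.length = 5) :
    emitP (b ++ c) rem = PySem.Str.join " " b :: emitP c rem := by
  induction rem generalizing c with
  | nil => exact flushB_five b c hb
  | cons t ts ih =>
    simp only [emitP]
    by_cases h : capA t = true
    · rw [if_pos h, if_pos h, List.append_assoc, ih]
    · rw [if_neg h, if_neg h, flushB_five b c hb]
      simp

theorem innerA_emitP (rem run : List String) (h : run.length < 5) :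
    emitP run rem = flushB [] (innerA rem run).1 ++ emitP [] (innerA rem run).2 := by
  induction rem generalizing run with
  | nil => simp [innerA, emitP, flushB_nil]
  | cons t ts ih =>
    by_cases hc : capA t = true
    · simp only [innerA, emitP, if_pos hc]
      by_cases h5 : (run ++ [rstripPunctA t]).length = 5
      · rw [if_pos h5]
        have := emitP_five ts (run ++ [rstripPunctA t]) [] h5
        simp only [List.append_nil] at this
        rw [this, flushB_small _ (by simp) (le_of_eq h5)]
        rw [if_pos (by omega)]
        simp
      · rw [if_neg h5]
        exact ih _ (by simp at h5 ⊢; omega)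
    · simp only [innerA, emitP, if_neg hc]
      rw [flushB_nil]
      simp

theorem innerA_fst_le (rem run : List String) (h : run.length < 5) :
    (innerA rem run).1.length ≤ 5 := by
  induction rem generalizing run with
  | nil => simp [innerA]; omega
  | cons t ts ih =>
    simp only [innerA]
    split
    · split
      · simp_all
      · exact ih _ (by simp_all; omega)
    · simpa using h.le

theorem innerA_nil_not_cap (t : String) (ts : List String)
    (h : (innerA (t :: ts) []).1 = []) : capA t = false := by
  by_contra hc
  simp only [Bool.not_eq_false] at hc
  have hp : ∀ (rem run : List String), run <+: (innerA rem run).1 := by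
    intro rem
    induction rem with
    | nil => intro run; simp [innerA]
    | cons a as ihh =>
      intro run
      simp only [innerA]
      split
      · split
        · exact List.prefix_append _ _
        · exact (List.prefix_append run [rstripPunctA a]).trans (ihh _)
      · simp
  simp only [innerA, if_pos hc, List.nil_append] at h
  split at h
  · simp at h
  · have := hp ts [rstripPunctA t]
    rw [h] at this
    simp at this

theorem outerA_emitP (rem out : List String) : outerA rem out = out ++ emitP [] rem := by
  induction hn : rem.length using Nat.strong_induction_on generalizing rem out with
  | _ n ih =>
    cases rem with
    | nil => simp [outerA, emitP, flushB_nil]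
    | cons t ts =>
      have hkey := innerA_emitP (t :: ts) [] (by simp)
      simp only [emitP] at hkey ⊢
      rw [outerA]
      by_cases h2 : (innerA (t :: ts) []).1.length ≥ 2
      · rw [if_pos h2]
        have hne : (innerA (t :: ts) []).1 ≠ [] := by intro h0; rw [h0] at h2; simp at h2
        have hlt := innerA_progress t ts hne
        rw [ih _ (by subst hn; simpa using hlt) _ _ rfl]
        rw [hkey, flushB_small _ hne (innerA_fst_le _ _ (by simp)), if_pos h2]
        simp
      · rw [if_neg h2]
        by_cases hne : (innerA (t :: ts) []).1 ≠ []
        · rw [if_pos hne]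
          have hlt := innerA_progress t ts hne
          rw [ih _ (by subst hn; simpa using hlt) _ _ rfl]
          rw [hkey, flushB_small _ hne (innerA_fst_le _ _ (by simp))]
          rw [if_neg (by omega)]
          simp
        · rw [if_neg hne]
          rw [ne_eq, not_not] at hne
          have hcap := innerA_nil_not_cap t ts hne
          rw [ih ts.length (by subst hn; simp) _ _ rfl,
              if_neg (by simp [hcap] : ¬ capA t = true), flushB_nil]
          simp

theorem foldB_emitP (l : List String) (out block : List String) :
    flushB (l.foldl stepB (out, block)).1 (l.foldl stepB (out, block)).2
      = out ++ emitP block l := by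
  induction l generalizing out block with
  | nil => simpa only [List.foldl_nil, emitP] using flushB_out out block
  | cons t ts ih =>
    simp only [List.foldl_cons, stepB, emitP, capA_eq_capB]
    by_cases hc : capB (rstripPunctB t) = true
    · rw [if_pos hc]
      simp only [if_pos hc]
      exact ih out (block ++ [rstripPunctB t])
    · rw [if_neg hc]
      simp only [if_neg hc]
      rw [ih (flushB out block) [], flushB_out out block]
      simp

-- ===== VERDICT (by name: the statement is the Claim_ definition above) =====
theorem merge_names_spec : Claim_equal_merge_names := by
  intro text _
  unfold Spec_merge_names merge_names merge_names_alt
  rw [outerA_emitP]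
  rw [foldB_emitP (PySem.Str.split₀ text) [] []]
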